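-- pv_equiv track=rewrite | github.com/wrightconnor55/reddit_stock_data | data_processing/Apply model.py | extract_names_in_order
-- ===== SOURCE A (Python) =====
-- def extract_names_in_order(text, char):
--     # Create a list to hold found names
--     found_n = []
--
--     # Create a dictionary to store the position of each name in the text
--     name_positions = {}
--
--     # Populate the name_positions dictionary with the starting index of each name
--     for name in char:
--         start = text.find(name)
--         if start != -1:
--             name_positions[name] = start
--
--     # Sort names by their positions in the text
--     sorted_names = sorted(name_positions, key=lambda k: name_positions[k])
--
--     # Add the names found to the list in order
--     for name in sorted_names:
--         if name in text:
--             found_n.append(name)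
--
--     return found_n
-- ===== SOURCE B (Python) =====
-- def extract_names_in_order(text, char):
--     # Single left-to-right scan over the text: at each position, names that
--     # start there are emitted (first hit only), so output order is first
--     # occurrence, ties broken by first-listed order -- no sort needed.
--     pending = list(dict.fromkeys(char))
--     out = []
--     for i in range(len(text) + 1):
--         if not pending:
--             break
--         still = []
--         for name in pending:
--             if text.startswith(name, i):
--                 out.append(name)
--             else:
--                 still.append(name)
--         pending = still
--     return out
-- ===== Notes on version B (the rewrite author's own statement) =====
-- stated objective: alternative
-- what changed: A runs text.find once per name, builds a position dict and stable-sorts the keys; B makes one left-to-right scan over text positions, emitting each pending (deduplicated) name at its first match, so the sort disappears.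
import Mathlib
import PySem

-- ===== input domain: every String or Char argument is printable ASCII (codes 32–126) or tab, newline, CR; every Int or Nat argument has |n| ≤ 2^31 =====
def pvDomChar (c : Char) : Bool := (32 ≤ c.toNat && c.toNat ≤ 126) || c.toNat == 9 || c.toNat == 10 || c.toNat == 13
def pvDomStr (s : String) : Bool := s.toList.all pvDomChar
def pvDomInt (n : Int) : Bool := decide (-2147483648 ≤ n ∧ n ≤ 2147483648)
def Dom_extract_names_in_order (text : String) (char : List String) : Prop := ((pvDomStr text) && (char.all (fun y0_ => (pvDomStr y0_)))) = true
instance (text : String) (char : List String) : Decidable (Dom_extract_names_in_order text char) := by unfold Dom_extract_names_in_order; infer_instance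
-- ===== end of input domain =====

-- B replaces A's find-per-name + position-dict + stable sort by a single left-to-right
-- scan over the text positions that emits each deduplicated name at its first match
-- (alternative decomposition, same results on every input).


-- ===== PORT A =====
def extract_names_in_order (text : String) (char : List String) : List String :=
  -- found_n = []
  let found_n : List String := []
  -- name_positions = {}
  let name_positions : PySem.Dict String Int := PySem.Dict.empty
  -- for name in char: start = text.find(name); if start != -1: name_positions[name] = start
  let name_positions := char.foldl (fun d name =>
      let start := PySem.Str.find text name
      if start ≠ -1 then d.insert name start else d) name_positions
  -- sorted_names = sorted(name_positions, key=lambda k: name_positions[k])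
  -- (every key of the dict is present, so the 0 default of getD is never read)
  let sorted_names := PySem.List.sorted name_positions.keys (fun k => name_positions.getD k 0)
  -- for name in sorted_names: if name in text: found_n.append(name)
  let found_n := sorted_names.foldl (fun acc name =>
      if PySem.Str.isIn name text then acc ++ [name] else acc) found_n
  found_n

-- ===== PORT B =====
-- the 'for i in range(len(text)+1)' loop of Source B with its 'if not pending: break';
-- the inner 'for name in pending' appends matches to out and the rest to still.
-- text.startswith(name, i) with 0 <= i <= len(text) is exactly: name is a prefix of text[i:]
-- (the range guarantees 0 <= i, so .toNat is exact here).
def pvScan (cs : List Char) : List Int → List String → List String → List String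
  | [], _, out => out
  | i :: rest, pending, out =>
    if pending = [] then out
    else
      let st := pending.foldl (fun (p : List String × List String) name =>
          if PySem.Chars.startswith (cs.drop i.toNat) name.toList then (p.1 ++ [name], p.2)
          else (p.1, p.2 ++ [name])) (out, [])
      pvScan cs rest st.2 st.1

def extract_names_in_order_alt (text : String) (char : List String) : List String :=
  -- pending = list(dict.fromkeys(char)); out = []; for i in range(len(text)+1): ...
  pvScan text.toList (PySem.List.pyRange 0 ((text.toList.length : Int) + 1) 1)
    (PySem.List.dedup char) []

-- ===== PRECONDITION & SPEC =====
def Spec_extract_names_in_order (text : String) (char : List String) (out : List String) : Prop := out = extract_names_in_order_alt text char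
instance (text : String) (char : List String) (out : List String) : Decidable (Spec_extract_names_in_order text char out) := by unfold Spec_extract_names_in_order; infer_instance

-- ===== CLAIM (what is proved, stated in full; the proofs are below) =====
def Claim_equal_extract_names_in_order : Prop := ∀ (text : String) (char : List String), Dom_extract_names_in_order text char → Spec_extract_names_in_order text char (extract_names_in_order text char)

-- ===== LEMMAS AND PROOFS =====

-- first-occurrence position of a name (as a Nat; only meaningful when the name occurs)
def pvPos (cs : List Char) (n : String) : Nat := (PySem.Chars.find cs n.toList).toNat
-- does the name occur in the text?
def pvFnd (cs : List Char) (n : String) : Bool := PySem.Chars.isIn n.toList cs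
-- the names of P whose first occurrence lies at j, j+1, ..., j+k-1, bucket by bucket:
-- the common normal form both programs are reduced to
def pvBuckets (cs : List Char) (P : List String) : Nat → Nat → List String
  | _, 0 => []
  | j, (k+1) => P.filter (fun n => pvPos cs n == j) ++ pvBuckets cs P (j+1) k

lemma pvMem_buckets {cs : List Char} {P : List String} :
    ∀ k j y, y ∈ pvBuckets cs P j k → y ∈ P ∧ j ≤ pvPos cs y ∧ pvPos cs y < j + k := by
  intro k
  induction k with
  | zero => intro j y h; simp [pvBuckets] at h
  | succ k ih =>
    intro j y h
    simp only [pvBuckets, List.mem_append] at h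
    rcases h with h | h
    · rcases List.mem_filter.mp h with ⟨hy, he⟩
      have : pvPos cs y = j := by simpa using he
      exact ⟨hy, by omega, by omega⟩
    · obtain ⟨hy, h1, h2⟩ := ih (j+1) y h
      exact ⟨hy, by omega, by omega⟩

lemma pvFnd_pos_le {cs : List Char} {n : String} (h : pvFnd cs n = true) :
    (PySem.Chars.find cs n.toList) = (pvPos cs n : Int) ∧ pvPos cs n ≤ cs.length := by
  have hinf : n.toList <:+: cs := (PySem.Chars.isIn_iff_infix _ _).mp h
  have h0 : 0 ≤ PySem.Chars.find cs n.toList := (PySem.Chars.find_nonneg_iff _ _).mpr hinf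
  have hle := PySem.Chars.find_le_length cs n.toList
  constructor
  · simp [pvPos, Int.toNat_of_nonneg h0]
  · simp only [pvPos]; omega

lemma pvMatch_iff {cs : List Char} {n : String} {j : Nat}
    (hnot : ¬ (pvFnd cs n = true ∧ pvPos cs n < j)) :
    PySem.Chars.startswith (cs.drop j) n.toList = (pvFnd cs n && (pvPos cs n == j)) := by
  by_cases hs : PySem.Chars.startswith (cs.drop j) n.toList = true
  · have hpre : n.toList <+: cs.drop j := (PySem.Chars.startswith_iff _ _).mp hs
    have hfnd : pvFnd cs n = true := by
      have := (PySem.Chars.exists_prefix_drop_iff_isIn n.toList cs).mp ⟨j, hpre⟩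
      simpa [pvFnd] using this
    have h0 : 0 ≤ PySem.Chars.find cs n.toList :=
      (PySem.Chars.find_nonneg_iff _ _).mpr ((PySem.Chars.isIn_iff_infix _ _).mp hfnd)
    have hspec := PySem.Chars.find_spec h0
    have hle : pvPos cs n ≤ j := by
      by_contra hlt
      exact hspec.2 j (by simp only [pvPos] at hlt ⊢; omega) hpre
    have hej : pvPos cs n = j := by
      rcases Nat.lt_or_ge (pvPos cs n) j with h' | h'
      · exact absurd ⟨hfnd, h'⟩ hnot
      · omega
    simp [hs, hfnd, hej]
  · simp only [Bool.not_eq_true] at hs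
    rw [hs]; symm
    simp only [Bool.and_eq_false_iff]
    by_cases hfnd : pvFnd cs n = true
    · right
      have h0 : 0 ≤ PySem.Chars.find cs n.toList :=
        (PySem.Chars.find_nonneg_iff _ _).mpr ((PySem.Chars.isIn_iff_infix _ _).mp hfnd)
      have hspec := PySem.Chars.find_spec h0
      have : pvPos cs n ≠ j := by
        intro he
        have := hspec.1
        rw [pvPos] at he
        rw [he] at this
        exact absurd ((PySem.Chars.startswith_iff _ _).mpr this) (by simp [hs])
      simpa using this
    · left; simpa using hfnd

lemma pvDict_fold (cs : List Char) :
    ∀ (l : List String) (M : List String),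
      (l.foldl (fun d name =>
          let start := PySem.Chars.find cs name.toList
          if start ≠ -1 then d.insert name start else d)
        (PySem.Dict.mk (M.map (fun n => (n, PySem.Chars.find cs n.toList))))).items
      = ((l.foldl (fun ks n => if pvFnd cs n && !(ks.contains n) then ks ++ [n] else ks) M).map
          (fun n => (n, PySem.Chars.find cs n.toList))) := by
  intro l
  induction l with
  | nil => intro M; simp
  | cons n l' ih =>
    intro M
    simp only [List.foldl_cons]
    by_cases hf : PySem.Chars.find cs n.toList ≠ -1
    · have hfnd : pvFnd cs n = true := by
        simp only [pvFnd]
        exact (PySem.Chars.isIn_iff_infix _ _).mpr ((PySem.Chars.find_ne_neg_one_iff _ _).mp hf)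
      by_cases hc : M.contains n
      · -- key present: overwrite with the same value leaves the dict unchanged
        have hmc : (PySem.Dict.mk (M.map (fun m => (m, PySem.Chars.find cs m.toList)))).contains n = true := by
          simp [PySem.Dict.contains, List.any_map, Function.comp]
          simpa [List.contains_iff_mem] using hc
        have hins : (PySem.Dict.mk (M.map (fun m => (m, PySem.Chars.find cs m.toList)))).insert n
            (PySem.Chars.find cs n.toList)
            = PySem.Dict.mk (M.map (fun m => (m, PySem.Chars.find cs m.toList))) := by
          simp only [PySem.Dict.insert, hmc, if_pos]
          congr 1
          rw [List.map_map]
          apply List.map_congr_left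
          intro m hm
          by_cases he : m = n <;> simp [Function.comp, he]
        simp only [hf, if_pos, ne_eq, not_false_iff, if_true, hins, hfnd, hc]
        simpa [hfnd, hc] using ih M
      · have hmc : (PySem.Dict.mk (M.map (fun m => (m, PySem.Chars.find cs m.toList)))).contains n = false := by
          simp [PySem.Dict.contains, List.any_map, Function.comp]
          intro x hx
          simp only [List.contains_iff_mem] at hc
          intro hxn; exact hc (hxn ▸ hx)
        have hins : (PySem.Dict.mk (M.map (fun m => (m, PySem.Chars.find cs m.toList)))).insert n
            (PySem.Chars.find cs n.toList)
            = PySem.Dict.mk ((M ++ [n]).map (fun m => (m, PySem.Chars.find cs m.toList))) := by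
          simp [PySem.Dict.insert, hmc]
        simp only [hf, if_pos, ne_eq, not_false_iff, if_true, hins, hfnd, hc]
        simpa [hfnd, hc] using ih (M ++ [n])
    · simp only [ne_eq, not_not] at hf
      have hfnd : pvFnd cs n = false := by
        simp only [pvFnd]
        rw [PySem.Chars.isIn_eq_false_iff]
        exact (PySem.Chars.find_eq_neg_one_iff _ _).mp hf
      simp only [hf, hfnd]
      simpa [hfnd] using ih M

lemma pvKeys_fold (p : String → Bool) :
    ∀ (l : List String) (S : List String),
      l.foldl (fun ks n => if p n && !(ks.contains n) then ks ++ [n] else ks) (S.filter p)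
      = (l.foldl PySem.Set.add S).filter p := by
  intro l
  induction l with
  | nil => intro S; simp
  | cons n l' ih =>
    intro S
    simp only [List.foldl_cons, PySem.Set.add, PySem.Set.contains]
    by_cases hc : n ∈ S
    · have hcf : n ∈ S.filter p ↔ p n = true := by simp [List.mem_filter, hc]
      by_cases hp : p n = true
      · simpa [hp, List.contains_iff_mem, hc, hcf.mpr hp] using ih S
      · simp only [Bool.not_eq_true] at hp
        simpa [hp, List.contains_iff_mem, hc] using ih S
    · have hcf : n ∉ S.filter p := by simp [List.mem_filter, hc]
      by_cases hp : p n = true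
      · simpa [hp, List.contains_iff_mem, hc, hcf, List.filter_append] using ih (S ++ [n])
      · simp only [Bool.not_eq_true] at hp
        simpa [hp, List.contains_iff_mem, hc, List.filter_append] using ih (S ++ [n])

lemma pvGetD_pair (cs : List Char) :
    ∀ (L : List String) (n : String), n ∈ L →
      (PySem.Dict.mk (L.map (fun m => (m, PySem.Chars.find cs m.toList)))).getD n 0
        = PySem.Chars.find cs n.toList := by
  intro L
  induction L with
  | nil => intro n h; simp at h
  | cons m L' ih =>
    intro n hn
    by_cases he : m = n
    · subst he
      simp [PySem.Dict.getD, PySem.Dict.get?]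
    · rcases List.mem_cons.mp hn with h | h
      · exact absurd h.symm he
      · have := ih n h
        simp only [PySem.Dict.getD, PySem.Dict.get?] at this ⊢
        simpa [List.find?, he] using this

lemma pvInsertBy_skip {x : String} {before : String → String → Bool} :
    ∀ (F zs : List String), (∀ y ∈ F, before x y = false) →
      PySem.List.insertBy before x (F ++ zs) = F ++ PySem.List.insertBy before x zs := by
  intro F
  induction F with
  | nil => intro zs h; simp
  | cons f F' ih =>
    intro zs h
    simp only [List.cons_append, PySem.List.insertBy]
    rw [if_neg (by simp [h f (by simp)])]
    rw [ih zs (fun y hy => h y (by simp [hy]))]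

lemma pvBuckets_snoc_out {cs : List Char} {x : String} :
    ∀ k j (P : List String), pvPos cs x < j ∨ j + k ≤ pvPos cs x →
      pvBuckets cs (P ++ [x]) j k = pvBuckets cs P j k := by
  intro k
  induction k with
  | zero => intro j P _; simp [pvBuckets]
  | succ k ih =>
    intro j P h
    simp only [pvBuckets, List.filter_append]
    rw [ih (j+1) P (by omega)]
    have hne : (pvPos cs x == j) = false := by
      simp only [beq_eq_false_iff_ne, ne_eq]; omega
    simp [hne]

lemma pvInsertBy_buckets {cs : List Char} {g : String → Int}
    (hg : ∀ n, g n = (pvPos cs n : Int)) :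
    ∀ k j (P : List String) (x : String), j ≤ pvPos cs x → pvPos cs x < j + k →
      PySem.List.insertBy (fun a b => decide (g a < g b)) x (pvBuckets cs P j k)
        = pvBuckets cs (P ++ [x]) j k := by
  intro k
  induction k with
  | zero => intro j P x h1 h2; omega
  | succ k ih =>
    intro j P x h1 h2
    have hskip : ∀ y ∈ P.filter (fun n => pvPos cs n == j), decide (g x < g y) = false := by
      intro y hy
      have hyj : pvPos cs y = j := by simpa using (List.mem_filter.mp hy).2
      simp only [hg, decide_eq_false_iff_not, not_lt, hyj]
      exact_mod_cast h1
    by_cases he : pvPos cs x = j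
    · simp only [pvBuckets, List.filter_append]
      rw [pvInsertBy_skip _ _ hskip]
      have htail : PySem.List.insertBy (fun a b => decide (g a < g b)) x (pvBuckets cs P (j+1) k)
          = x :: pvBuckets cs P (j+1) k := by
        cases hB : pvBuckets cs P (j+1) k with
        | nil => simp [PySem.List.insertBy]
        | cons h t =>
          have hh : h ∈ pvBuckets cs P (j+1) k := by rw [hB]; simp
          obtain ⟨-, hge, -⟩ := pvMem_buckets k (j+1) h hh
          have hlt : decide (g x < g h) = true := by
            simp only [hg, decide_eq_true_eq]
            have : pvPos cs x < pvPos cs h := by omega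
            exact_mod_cast this
          simp [PySem.List.insertBy, hlt]
      rw [htail, pvBuckets_snoc_out k (j+1) P (by omega)]
      have heq : (pvPos cs x == j) = true := by simpa using he
      simp [heq]
    · simp only [pvBuckets, List.filter_append]
      rw [pvInsertBy_skip _ _ hskip]
      rw [ih (j+1) P x (by omega) (by omega)]
      have hne : (pvPos cs x == j) = false := by simpa using he
      simp [hne]

lemma pvSorted_fold {cs : List Char} {g : String → Int}
    (hg : ∀ n, g n = (pvPos cs n : Nat)) :
    ∀ (l : List String) (P : List String) (m : Nat),
      (∀ n ∈ l, pvPos cs n < m) →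
      l.foldl (fun acc x => PySem.List.insertBy (fun a b => decide (g a < g b)) x acc)
        (pvBuckets cs P 0 m) = pvBuckets cs (P ++ l) 0 m := by
  intro l
  induction l with
  | nil => intro P m _; simp
  | cons x l' ih =>
    intro P m hbound
    simp only [List.foldl_cons]
    rw [pvInsertBy_buckets hg m 0 P x (by omega) (by simpa using hbound x (by simp))]
    rw [ih (P ++ [x]) m (fun n hn => hbound n (by simp [hn]))]
    simp

lemma pvBuckets_nil {cs : List Char} : ∀ k j, pvBuckets cs [] j k = [] := by
  intro k
  induction k with
  | zero => intro j; simp [pvBuckets]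
  | succ k ih => intro j; simp [pvBuckets, ih]

lemma pvInsertBy_congr {x : String} {before before' : String → String → Bool} :
    ∀ (ys : List String), (∀ y ∈ ys, before x y = before' x y) →
      PySem.List.insertBy before x ys = PySem.List.insertBy before' x ys := by
  intro ys
  induction ys with
  | nil => intro _; rfl
  | cons y ys' ih =>
    intro h
    simp only [PySem.List.insertBy, h y (by simp)]
    by_cases hb : before' x y = true
    · simp [hb]
    · simp only [Bool.not_eq_true] at hb
      simp only [hb]
      rw [if_neg (by simp), if_neg (by simp)]
      rw [ih (fun z hz => h z (by simp [hz]))]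

lemma pvFoldl_insertBy_congr {g g' : String → Int} {L : List String}
    (h : ∀ n ∈ L, g n = g' n) :
    ∀ (l : List String) (acc : List String), (∀ n ∈ l, n ∈ L) → (∀ n ∈ acc, n ∈ L) →
      l.foldl (fun acc x => PySem.List.insertBy (fun a b => decide (g a < g b)) x acc) acc
      = l.foldl (fun acc x => PySem.List.insertBy (fun a b => decide (g' a < g' b)) x acc) acc := by
  intro l
  induction l with
  | nil => intro acc _ _; rfl
  | cons x l' ih =>
    intro acc hl hacc
    simp only [List.foldl_cons]
    have hx : x ∈ L := hl x (by simp)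
    have hcongr : PySem.List.insertBy (fun a b => decide (g a < g b)) x acc
        = PySem.List.insertBy (fun a b => decide (g' a < g' b)) x acc := by
      apply pvInsertBy_congr
      intro y hy
      rw [h x hx, h y (hacc y hy)]
    rw [hcongr]
    refine ih _ (fun n hn => hl n (by simp [hn])) ?_
    intro n hn
    rcases (PySem.List.mem_insertBy _ _ _ _).mp hn with he | hm
    · exact he ▸ hx
    · exact hacc n hm

lemma pvPartition_fold (q : String → Bool) :
    ∀ (l : List String) (o s : List String),
      l.foldl (fun (p : List String × List String) name =>
          if q name then (p.1 ++ [name], p.2) else (p.1, p.2 ++ [name])) (o, s)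
      = (o ++ l.filter q, s ++ l.filter (fun n => ! q n)) := by
  intro l
  induction l with
  | nil => intro o s; simp
  | cons n l' ih =>
    intro o s
    by_cases hq : q n = true
    · simp only [List.foldl_cons, hq, if_pos]
      simpa [hq] using ih (o ++ [n]) s
    · simp only [Bool.not_eq_true] at hq
      simp only [List.foldl_cons]
      rw [if_neg (by simp [hq])]
      simpa [hq] using ih o (s ++ [n])

lemma pvScan_fold (cs : List Char) (D : List String) :
    ∀ k j (out : List String), j + k = cs.length + 1 →
      pvScan cs ((List.range' j k).map Int.ofNat)
        (D.filter (fun n => !(pvFnd cs n && decide (pvPos cs n < j)))) out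
      = out ++ pvBuckets cs (D.filter (pvFnd cs)) j k := by
  intro k
  induction k with
  | zero => intro j out _; simp [pvScan, pvBuckets]
  | succ k ih =>
    intro j out hlen
    rw [List.range'_succ, List.map_cons]
    by_cases hpend : D.filter (fun n => !(pvFnd cs n && decide (pvPos cs n < j))) = []
    · rw [hpend]
      simp only [pvScan, if_pos rfl]
      have hb : pvBuckets cs (D.filter (pvFnd cs)) j (k+1) = [] := by
        rw [List.eq_nil_iff_forall_not_mem]
        intro y hy
        obtain ⟨hyL, hge, -⟩ := pvMem_buckets (k+1) j y hy
        rcases List.mem_filter.mp hyL with ⟨hyD, hyf⟩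
        have : y ∈ D.filter (fun n => !(pvFnd cs n && decide (pvPos cs n < j))) := by
          refine List.mem_filter.mpr ⟨hyD, ?_⟩
          simp [hyf]
          omega
        rw [hpend] at this
        simp at this
      rw [hb]; simp
    · simp only [pvScan, if_neg hpend]
      have htn : (Int.ofNat j).toNat = j := rfl
      rw [htn, pvPartition_fold]
      simp only []
      have B1 : ∀ n, (PySem.Chars.startswith (cs.drop j) n.toList
            && !(pvFnd cs n && decide (pvPos cs n < j)))
          = ((pvPos cs n == j) && pvFnd cs n) := by
        intro n
        by_cases hc : pvFnd cs n = true ∧ pvPos cs n < j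
        · have : (pvPos cs n == j) = false := by simp; omega
          simp [hc.1, hc.2, this]
        · rw [pvMatch_iff hc]
          by_cases hf : pvFnd cs n = true
          · have hge : ¬ pvPos cs n < j := fun h => hc ⟨hf, h⟩
            simp [hf, hge, Bool.and_comm]
          · simp only [Bool.not_eq_true] at hf
            simp [hf]
      have B2 : ∀ n, ((!PySem.Chars.startswith (cs.drop j) n.toList)
            && !(pvFnd cs n && decide (pvPos cs n < j)))
          = (!(pvFnd cs n && decide (pvPos cs n < j + 1))) := by
        intro n
        by_cases hc : pvFnd cs n = true ∧ pvPos cs n < j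
        · simp [hc.1, hc.2, Nat.lt_succ_of_lt hc.2]
        · rw [pvMatch_iff hc]
          by_cases hf : pvFnd cs n = true
          · have hge : ¬ pvPos cs n < j := fun h => hc ⟨hf, h⟩
            have : (pvPos cs n < j + 1) ↔ (pvPos cs n = j) := by omega
            by_cases he : pvPos cs n = j <;> simp [hf, hge, this, he]
          · simp only [Bool.not_eq_true] at hf
            simp [hf]
      rw [List.filter_filter, List.filter_filter]
      rw [List.filter_congr (fun n _ => B1 n), List.filter_congr (fun n _ => B2 n)]
      rw [List.nil_append, ih (j+1) _ (by omega)]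
      simp only [pvBuckets, ← List.filter_filter]
      simp [List.append_assoc]

-- ===== VERDICT (by name: the statement is the Claim_ definition above) =====
theorem extract_names_in_order_spec : Claim_equal_extract_names_in_order := by
  intro text char _
  unfold Spec_extract_names_in_order
  show (let found_n : List String := []
    let name_positions : PySem.Dict String Int := PySem.Dict.empty
    let name_positions := char.foldl (fun d name =>
        let start := PySem.Str.find text name
        if start ≠ -1 then d.insert name start else d) name_positions
    let sorted_names := PySem.List.sorted name_positions.keys (fun k => name_positions.getD k 0)
    let found_n := sorted_names.foldl (fun acc name =>
        if PySem.Str.isIn name text then acc ++ [name] else acc) found_n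
    found_n) = _
  simp only [PySem.Str.find_eq]
  set cs := text.toList with hcs
  set L : List String := (char.foldl PySem.Set.add []).filter (pvFnd cs) with hL
  -- the dictionary after the first loop
  have hdict : (char.foldl (fun d name =>
        let start := PySem.Chars.find cs name.toList
        if start ≠ -1 then d.insert name start else d) (PySem.Dict.empty : PySem.Dict String Int))
      = PySem.Dict.mk (L.map (fun n => (n, PySem.Chars.find cs n.toList))) := by
    apply PySem.Dict.ext
    have h0 : (PySem.Dict.empty : PySem.Dict String Int)
        = PySem.Dict.mk (([] : List String).map (fun n => (n, PySem.Chars.find cs n.toList))) := rfl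
    rw [h0, pvDict_fold cs char []]
    have := pvKeys_fold (pvFnd cs) char []
    simp only [List.filter_nil] at this
    rw [this]
  rw [hdict]
  set d := PySem.Dict.mk (L.map (fun n => (n, PySem.Chars.find cs n.toList))) with hd
  have hkeys : d.keys = L := by
    simp only [hd, PySem.Dict.keys, List.map_map]
    have hid : ∀ n ∈ L, ((fun (x : String × Int) => x.1) ∘ fun n => (n, PySem.Chars.find cs n.toList)) n = id n := fun n _ => rfl
    rw [List.map_congr_left hid, List.map_id]
  rw [hkeys]
  have hmemL : ∀ n ∈ L, pvFnd cs n = true := by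
    intro n hn
    exact (List.mem_filter.mp (hL ▸ hn)).2
  -- replace the dict-lookup key by the plain position key
  have hsorted : PySem.List.sorted L (fun k => d.getD k 0)
      = pvBuckets cs L 0 (cs.length + 1) := by
    rw [PySem.List.sorted_eq_foldl_insertBy]
    have hagree : ∀ n ∈ L, (fun k => d.getD k 0) n = (fun k => ((pvPos cs k : Nat) : Int)) n := by
      intro n hn
      simp only [hd]
      rw [pvGetD_pair cs L n hn]
      exact (pvFnd_pos_le (hmemL n hn)).1
    have hstart : ([] : List String) = pvBuckets cs [] 0 (cs.length + 1) := (pvBuckets_nil _ _).symm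
    rw [pvFoldl_insertBy_congr hagree L [] (fun n hn => hn) (by simp)]
    rw [hstart]
    rw [pvSorted_fold (fun n => rfl) L [] (cs.length + 1)
      (fun n hn => by have := (pvFnd_pos_le (hmemL n hn)).2; omega)]
    simp
  rw [hsorted]
  -- the final loop keeps everything
  simp only [PySem.List.foldl_append_if, List.nil_append]
  rw [List.filter_eq_self.mpr (by
    intro y hy
    have hyL : y ∈ L := (pvMem_buckets _ _ y hy).1
    rw [PySem.Str.isIn_eq]
    exact hmemL y hyL)]
  simp only [List.map_id']
  -- now the B side
  show pvBuckets cs L 0 (cs.length + 1) = extract_names_in_order_alt text char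
  unfold extract_names_in_order_alt
  have hrange : PySem.List.pyRange 0 ((cs.length : Int) + 1) 1 = (List.range' 0 (cs.length + 1)).map Int.ofNat := by
    rw [PySem.List.pyRange_of_pos _ _ (by omega)]
    simp [List.range_eq_range']
  rw [← hcs, hrange]
  have hdedup : (PySem.List.dedup char : List String)
      = (char.foldl PySem.Set.add []).filter (fun n => !(pvFnd cs n && decide (pvPos cs n < 0))) := by
    simp [PySem.List.dedup, PySem.Set.ofList, PySem.Set.empty]
  rw [hdedup, pvScan_fold cs (char.foldl PySem.Set.add []) (cs.length + 1) 0 [] (by omega)]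
  simp [hL]
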